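-- pv_equiv track=rewrite | github.com/ClaytonB-3/data_privacy_law | data_privacy_law/db_manager/faiss_db_manager.py | calculate_updated_chunk_ids
-- ===== SOURCE A (Python) =====
-- def calculate_updated_chunk_ids(chunk_metadatas):
--     """
--     Update each metadata dict with a unique 'chunk_id' that includes the PDF source, page number,
--     and a chunk index that resets for each new page.
--     Format: "source:page:chunk_index"
--
--     This is used in various streamlit pages to display the tables
--     """
--     last_page_id = None
--     current_chunk_index = 0
--
--     for meta in chunk_metadatas:
--         source = meta.get("Title", "unknown")
--         source = source.replace(" ", "_")
--         page = meta.get("Page", "1")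
--         current_page_id = f"{source}_Page_{page}"
--
--         if current_page_id == last_page_id:
--             current_chunk_index += 1
--         else:
--             current_chunk_index = 0
--
--         meta["Chunk_id"] = f"{current_page_id}_ChunkNo_{current_chunk_index}"
--         last_page_id = current_page_id
--
--     return chunk_metadatas
-- ===== SOURCE B (Python) =====
-- def calculate_updated_chunk_ids(chunk_metadatas):
--     def page_id(meta):
--         return meta.get("Title", "unknown").replace(" ", "_") + "_Page_" + str(meta.get("Page", "1"))
--
--     i = 0
--     n = len(chunk_metadatas)
--     while i < n:
--         pid = page_id(chunk_metadatas[i])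
--         j = i + 1
--         while j < n and page_id(chunk_metadatas[j]) == pid:
--             j += 1
--         for idx, meta in enumerate(chunk_metadatas[i:j]):
--             meta["Chunk_id"] = f"{pid}_ChunkNo_{idx}"
--         i = j
--     return chunk_metadatas
-- ===== Notes on version B (the rewrite author's own statement) =====
-- stated objective: idiomatic
-- what changed: Replaces A's threaded last_page_id/current_chunk_index state with a groupby-style decomposition: split the list into maximal consecutive runs of equal page id, then number each run with enumerate from 0.
import Mathlib
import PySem

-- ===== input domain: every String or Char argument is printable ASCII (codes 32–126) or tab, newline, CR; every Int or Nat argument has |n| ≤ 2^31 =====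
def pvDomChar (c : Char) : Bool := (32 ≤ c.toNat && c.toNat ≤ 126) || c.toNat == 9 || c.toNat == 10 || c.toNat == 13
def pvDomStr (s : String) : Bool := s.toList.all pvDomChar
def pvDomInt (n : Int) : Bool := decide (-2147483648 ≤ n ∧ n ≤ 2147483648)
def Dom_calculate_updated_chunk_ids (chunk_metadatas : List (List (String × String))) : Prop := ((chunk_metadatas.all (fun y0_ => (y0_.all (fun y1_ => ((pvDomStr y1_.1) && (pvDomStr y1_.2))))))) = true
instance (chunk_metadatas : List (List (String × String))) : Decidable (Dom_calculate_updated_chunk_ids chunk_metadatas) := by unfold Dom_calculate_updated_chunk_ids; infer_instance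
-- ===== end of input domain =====

-- B replaces A's threaded last_page_id/current_chunk_index state by a groupby-style
-- decomposition (find each consecutive same-page run, then number it from 0); objective: idiomatic.
-- Both Pythons mutate the metadata dicts in place the same way; the equivalence proved is about the returned value.

-- ===== PORT A =====
-- literal transliteration of A's for-loop: state (last_page_id, current_chunk_index) threaded through the list
def pvGoA (last : Option String) (idx : Int) : List (List (String × String)) → List (List (String × String))
  | [] => []
  | md :: rest =>
    let d := PySem.Dict.ofList md
    let source := PySem.Str.replace (d.getD "Title" "unknown") " " "_"
    let page := d.getD "Page" "1"
    let currentPageId := source ++ "_Page_" ++ page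
    let idx' := if some currentPageId == last then idx + 1 else (0 : Int)
    (d.insert "Chunk_id" (currentPageId ++ "_ChunkNo_" ++ PySem.Int.toStr idx')).items
      :: pvGoA (some currentPageId) idx' rest

def calculate_updated_chunk_ids (chunk_metadatas : List (List (String × String))) : List (List (String × String)) :=
  pvGoA none 0 chunk_metadatas

-- ===== PORT B =====
-- B's page_id helper
def pvKeyB (md : List (String × String)) : String :=
  PySem.Str.replace ((PySem.Dict.ofList md).getD "Title" "unknown") " " "_"
    ++ "_Page_" ++ (PySem.Dict.ofList md).getD "Page" "1"

-- B's outer while loop: split the list into maximal consecutive runs of equal page_id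
-- (the inner 'while j < n and page_id(...) == pid' scan is takeWhile/dropWhile on the tail)
def pvRunsB : List (List (String × String)) → List (String × List (List (String × String)))
  | [] => []
  | m :: rest =>
    let k := pvKeyB m
    (k, m :: rest.takeWhile (fun m' => pvKeyB m' == k))
      :: pvRunsB (rest.dropWhile (fun m' => pvKeyB m' == k))
  termination_by xs => xs.length
  decreasing_by simp; exact List.length_dropWhile_le _ _

-- B's 'for idx, md in enumerate(...)' numbering of each run
def calculate_updated_chunk_ids_alt (chunk_metadatas : List (List (String × String))) : List (List (String × String)) :=
  (pvRunsB chunk_metadatas).flatMap (fun kg =>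
    (PySem.List.enumerate kg.2 0).map (fun im =>
      ((PySem.Dict.ofList im.2).insert "Chunk_id" (kg.1 ++ "_ChunkNo_" ++ PySem.Int.toStr im.1)).items))

-- ===== PRECONDITION & SPEC =====
def Spec_calculate_updated_chunk_ids (chunk_metadatas : List (List (String × String))) (out : List (List (String × String))) : Prop := out = calculate_updated_chunk_ids_alt chunk_metadatas
instance (chunk_metadatas : List (List (String × String))) (out : List (List (String × String))) : Decidable (Spec_calculate_updated_chunk_ids chunk_metadatas out) := by unfold Spec_calculate_updated_chunk_ids; infer_instance

-- ===== CLAIM (what is proved, stated in full; the proofs are below) =====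
def Claim_equal_calculate_updated_chunk_ids : Prop := ∀ (chunk_metadatas : List (List (String × String))), Dom_calculate_updated_chunk_ids chunk_metadatas → Spec_calculate_updated_chunk_ids chunk_metadatas (calculate_updated_chunk_ids chunk_metadatas)

-- ===== LEMMAS AND PROOFS =====

-- the tagged metadata of one element
def pvTag (k : String) (i : Int) (m : List (String × String)) : List (String × String) :=
  ((PySem.Dict.ofList m).insert "Chunk_id" (k ++ "_ChunkNo_" ++ PySem.Int.toStr i)).items

-- a run tagged with consecutive indices starting at i
def pvTagFrom (k : String) (i : Int) : List (List (String × String)) → List (List (String × String))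
  | [] => []
  | m :: g => pvTag k i m :: pvTagFrom k (i + 1) g

theorem pvEnumMap (k : String) (g : List (List (String × String))) (i : Int) :
    (PySem.List.enumerate g i).map (fun im =>
      ((PySem.Dict.ofList im.2).insert "Chunk_id" (k ++ "_ChunkNo_" ++ PySem.Int.toStr im.1)).items)
      = pvTagFrom k i g := by
  induction g generalizing i with
  | nil => simp [PySem.List.enumerate_nil, pvTagFrom]
  | cons m g ih => simp [PySem.List.enumerate_cons, pvTagFrom, pvTag, ih]

theorem pvGoA_cons (last : Option String) (idx : Int) (m : List (String × String))
    (rest : List (List (String × String))) :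
    pvGoA last idx (m :: rest)
      = pvTag (pvKeyB m) (if some (pvKeyB m) == last then idx + 1 else 0) m
        :: pvGoA (some (pvKeyB m))
             (if some (pvKeyB m) == last then idx + 1 else 0) rest := rfl

theorem pvGoA_span (rest : List (List (String × String))) (k : String) (j : Int) :
    pvGoA (some k) j rest
      = pvTagFrom k (j + 1) (rest.takeWhile (fun m' => pvKeyB m' == k))
        ++ pvGoA none 0 (rest.dropWhile (fun m' => pvKeyB m' == k)) := by
  induction rest generalizing j with
  | nil => simp [pvGoA, pvTagFrom]
  | cons m t ih =>
    by_cases h : pvKeyB m = k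
    · subst h
      rw [pvGoA_cons]
      simp only [List.takeWhile_cons, List.dropWhile_cons, beq_self_eq_true, if_true]
      rw [ih (j + 1)]
      simp [pvTagFrom]
    · have hb : (pvKeyB m == k) = false := beq_eq_false_iff_ne.mpr h
      have h1 : (some (pvKeyB m) == some k) = false := by simp [h]
      have h2 : (some (pvKeyB m) == (none : Option String)) = false := rfl
      simp only [List.takeWhile_cons, List.dropWhile_cons, hb, Bool.false_eq_true, if_false]
      rw [pvGoA_cons, pvGoA_cons, h1, h2]
      simp only [Bool.false_eq_true, if_false]
      simp [pvTagFrom]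

theorem pvMain (n : Nat) (xs : List (List (String × String))) (hl : xs.length ≤ n) :
    pvGoA none 0 xs = calculate_updated_chunk_ids_alt xs := by
  induction n generalizing xs with
  | zero =>
    cases xs with
    | nil => simp [pvGoA, calculate_updated_chunk_ids_alt, pvRunsB]
    | cons m rest => simp at hl
  | succ n ih =>
    cases xs with
    | nil => simp [pvGoA, calculate_updated_chunk_ids_alt, pvRunsB]
    | cons m rest =>
      have h0 : (some (pvKeyB m) == (none : Option String)) = false := rfl
      rw [pvGoA_cons, h0]
      simp only [Bool.false_eq_true, if_false]
      rw [pvGoA_span]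
      have hlen : (rest.dropWhile (fun m' => pvKeyB m' == pvKeyB m)).length ≤ n :=
        le_trans (List.length_dropWhile_le _ _) (Nat.le_of_succ_le_succ (by simpa using hl))
      rw [ih _ hlen]
      simp [calculate_updated_chunk_ids_alt, pvRunsB, pvEnumMap, pvTagFrom, pvTag]

-- ===== VERDICT (by name: the statement is the Claim_ definition above) =====
theorem calculate_updated_chunk_ids_spec : Claim_equal_calculate_updated_chunk_ids := by
  intro xs _
  unfold Spec_calculate_updated_chunk_ids calculate_updated_chunk_ids
  exact pvMain xs.length xs le_rfl
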